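-- pv_equiv track=rewrite | github.com/YogeshKumar805/POTD-Geeks-For-Geeks | Max Xor Subarray of size K.py | maxSubarrayXOR
-- ===== SOURCE A (Python) =====
-- def maxSubarrayXOR(arr, k):
--     # code here
--     xor=0
--     ans=0
--     for i in range(k-1):
--         xor=xor^arr[i]
--     for i in range(k-1,len(arr)):
--         xor=xor^arr[i]
--         if xor>ans:
--             ans=xor
--         xor=xor^arr[i-k+1]
--     return ans
-- ===== SOURCE B (Python) =====
-- def maxSubarrayXOR(arr, k):
--     p = [0]
--     for x in arr:
--         p.append(p[-1] ^ x)
--     ans = 0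
--     for s in range(len(arr) - k + 1):
--         w = p[s + k] ^ p[s]
--         if w > ans:
--             ans = w
--     return ans
-- ===== Notes on version B (the rewrite author's own statement) =====
-- stated objective: alternative
-- what changed: Replaces A's incrementally maintained sliding-window XOR (xor the entering element in, xor the leaving element out each step) with a prefix-XOR table built in one pass and queried at the two endpoints of each window.
import Mathlib
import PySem

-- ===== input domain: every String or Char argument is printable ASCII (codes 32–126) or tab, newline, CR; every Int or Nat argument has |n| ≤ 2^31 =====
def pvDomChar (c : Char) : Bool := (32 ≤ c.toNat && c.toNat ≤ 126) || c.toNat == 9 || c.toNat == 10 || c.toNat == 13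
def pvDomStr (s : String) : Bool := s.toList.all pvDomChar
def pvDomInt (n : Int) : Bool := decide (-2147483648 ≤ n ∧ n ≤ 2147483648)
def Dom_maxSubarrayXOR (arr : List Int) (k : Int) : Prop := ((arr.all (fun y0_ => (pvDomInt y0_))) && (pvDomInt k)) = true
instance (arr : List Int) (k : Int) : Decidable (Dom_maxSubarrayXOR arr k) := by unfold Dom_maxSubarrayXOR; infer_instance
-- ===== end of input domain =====

-- B replaces A's incrementally maintained sliding-window XOR by a prefix-XOR table
-- queried at the two window endpoints (objective: alternative decomposition, same cost).

-- ===== PORT A =====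
-- one iteration of A's second loop: xor ^= arr[i]; update ans; xor ^= arr[i-k+1]
def pvStepA (arr : List Int) (k : Int) (st : Int × Int) (i : Int) : Int × Int :=
  let x := PySem.Int.bxor st.1 (PySem.List.pyGetD arr i 0)
  let a := if x > st.2 then x else st.2
  (PySem.Int.bxor x (PySem.List.pyGetD arr (i - k + 1) 0), a)

def maxSubarrayXOR (arr : List Int) (k : Int) : Int :=
  let xor0 : Int := (PySem.List.pyRange 0 (k - 1) 1).foldl
    (fun xor i => PySem.Int.bxor xor (PySem.List.pyGetD arr i 0)) 0
  ((PySem.List.pyRange (k - 1) (arr.length : Int) 1).foldl (pvStepA arr k) (xor0, 0)).2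

-- ===== PORT B =====
-- p.append(p[-1] ^ x)
def pvBuildP (p : List Int) (x : Int) : List Int :=
  p ++ [PySem.Int.bxor (PySem.List.pyGetD p (-1) 0) x]

-- one iteration of B's loop: w = p[s+k] ^ p[s]; update ans
def pvStepB (p : List Int) (k : Int) (ans : Int) (s : Int) : Int :=
  let w := PySem.Int.bxor (PySem.List.pyGetD p (s + k) 0) (PySem.List.pyGetD p s 0)
  if w > ans then w else ans

def maxSubarrayXOR_alt (arr : List Int) (k : Int) : Int :=
  let p := arr.foldl pvBuildP [0]
  (PySem.List.pyRange 0 ((arr.length : Int) - k + 1) 1).foldl (pvStepB p k) 0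

-- ===== PRECONDITION & SPEC =====
-- Pre_ is exactly A's return domain: outside it (k ≤ 0 or k ≥ len+2) A raises IndexError.
def Pre_maxSubarrayXOR (arr : List Int) (k : Int) : Prop :=
  1 ≤ k ∧ k ≤ (arr.length : Int) + 1
instance (arr : List Int) (k : Int) : Decidable (Pre_maxSubarrayXOR arr k) := by
  unfold Pre_maxSubarrayXOR; infer_instance

def pvWitness_maxSubarrayXOR : List Int × Int := ([1, 2, 3], 2)

def Spec_maxSubarrayXOR (arr : List Int) (k : Int) (out : Int) : Prop := out = maxSubarrayXOR_alt arr k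
instance (arr : List Int) (k : Int) (out : Int) : Decidable (Spec_maxSubarrayXOR arr k out) := by unfold Spec_maxSubarrayXOR; infer_instance

-- ===== CLAIM (what is proved, stated in full; the proofs are below) =====
def Claim_equal_maxSubarrayXOR : Prop := ∀ (arr : List Int) (k : Int), Dom_maxSubarrayXOR arr k → Pre_maxSubarrayXOR arr k → Spec_maxSubarrayXOR arr k (maxSubarrayXOR arr k)

-- ===== LEMMAS AND PROOFS =====

theorem pv_bxor_eq_xor (a b : Int) : PySem.Int.bxor a b = Int.xor a b := by
  cases a with
  | ofNat m => cases b with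
    | ofNat n => simp [PySem.Int.bxor, Int.xor]
    | negSucc n => simp [PySem.Int.bxor, Int.xor, Int.negSucc_eq]; ring_nf; omega
  | negSucc m => cases b with
    | ofNat n => simp [PySem.Int.bxor, Int.xor, Int.negSucc_eq]; ring_nf; omega
    | negSucc n => simp [PySem.Int.bxor, Int.xor, Int.negSucc_eq]; omega

theorem pv_bxor_assoc (a b c : Int) :
    PySem.Int.bxor (PySem.Int.bxor a b) c = PySem.Int.bxor a (PySem.Int.bxor b c) := by
  simp only [pv_bxor_eq_xor]
  cases a <;> cases b <;> cases c <;> simp [Int.xor, Nat.xor_assoc]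

theorem pv_bxor_right_comm (a b c : Int) :
    PySem.Int.bxor (PySem.Int.bxor a b) c = PySem.Int.bxor (PySem.Int.bxor a c) b := by
  rw [pv_bxor_assoc, pv_bxor_assoc, PySem.Int.bxor_comm b c]

theorem pv_zero_bxor (a : Int) : PySem.Int.bxor 0 a = a := by
  rw [PySem.Int.bxor_comm, PySem.Int.bxor_zero]

-- XOR of the first i elements of arr
def pvPXor (arr : List Int) (i : Nat) : Int := (arr.take i).foldl PySem.Int.bxor 0

theorem pv_foldl_bxor_init (l : List Int) (x : Int) :
    l.foldl PySem.Int.bxor x = PySem.Int.bxor x (l.foldl PySem.Int.bxor 0) := by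
  induction l generalizing x with
  | nil => simp [List.foldl, PySem.Int.bxor_zero]
  | cons y t ih =>
    simp only [List.foldl]
    rw [ih (PySem.Int.bxor x y), ih (PySem.Int.bxor 0 y), pv_zero_bxor, pv_bxor_assoc]

theorem pvPXor_zero (arr : List Int) : pvPXor arr 0 = 0 := rfl

theorem pvPXor_succ (arr : List Int) (i : Nat) (h : i < arr.length) :
    pvPXor arr (i + 1) = PySem.Int.bxor (pvPXor arr i) arr[i] := by
  unfold pvPXor
  rw [List.take_add_one, List.getElem?_eq_getElem h]
  rw [Option.toList_some, List.foldl_append]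
  rfl

theorem pvPXor_cons (x : Int) (xs : List Int) (i : Nat) :
    pvPXor (x :: xs) (i + 1) = PySem.Int.bxor x (pvPXor xs i) := by
  unfold pvPXor
  simp only [List.take_succ_cons, List.foldl]
  rw [pv_foldl_bxor_init, pv_zero_bxor]

-- the prefix-XOR list B builds
def pvPrefixes : List Int → Int → List Int
  | [], c => [c]
  | x :: xs, c => c :: pvPrefixes xs (PySem.Int.bxor c x)

theorem pv_foldl_buildP (arr : List Int) :
    ∀ (pre : List Int) (c : Int),
      arr.foldl pvBuildP (pre ++ [c]) = pre ++ pvPrefixes arr c := by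
  induction arr with
  | nil => intro pre c; simp [pvPrefixes]
  | cons x xs ih =>
    intro pre c
    simp only [List.foldl, pvBuildP, PySem.List.pyGetD_neg_one_append_singleton, pvPrefixes]
    rw [ih (pre ++ [c]) (PySem.Int.bxor c x)]
    simp

theorem pvPrefixes_getElem? (arr : List Int) :
    ∀ (c : Int) (i : Nat), i ≤ arr.length →
      (pvPrefixes arr c)[i]? = some (PySem.Int.bxor c (pvPXor arr i)) := by
  induction arr with
  | nil =>
    intro c i h
    have hi : i = 0 := by simp at h; omega
    subst hi
    simp [pvPrefixes, pvPXor, PySem.Int.bxor_zero]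
  | cons x xs ih =>
    intro c i h
    cases i with
    | zero => simp [pvPrefixes, pvPXor, PySem.Int.bxor_zero]
    | succ j =>
      simp only [pvPrefixes, List.getElem?_cons_succ]
      rw [ih (PySem.Int.bxor c x) j (by simpa using h), pvPXor_cons, pv_bxor_assoc]

theorem pvP_lookup (arr : List Int) (i : Nat) (h : i ≤ arr.length) :
    PySem.List.pyGetD (pvPrefixes arr 0) (i : Int) 0 = pvPXor arr i := by
  rw [PySem.List.pyGetD_natCast, List.getD, pvPrefixes_getElem? arr 0 i h, pv_zero_bxor]
  rfl

theorem pvArr_lookup (arr : List Int) (i : Nat) (h : i < arr.length) :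
    PySem.List.pyGetD arr (i : Int) 0 = arr[i] := by
  rw [PySem.List.pyGetD_natCast, List.getD, List.getElem?_eq_getElem h]
  rfl

-- A's first loop computes the XOR of the first m elements
theorem pv_loop1 (arr : List Int) :
    ∀ (m : Nat), m ≤ arr.length →
      (PySem.List.pyRange 0 (m : Int) 1).foldl
        (fun xor i => PySem.Int.bxor xor (PySem.List.pyGetD arr i 0)) 0 = pvPXor arr m := by
  intro m
  induction m with
  | zero => intro _; simp [PySem.List.pyRange_one_eq_nil, pvPXor]
  | succ j ih =>
    intro h
    have hb : ((j : Int) + 1) = ((j + 1 : Nat) : Int) := by push_cast; ring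
    rw [← hb, PySem.List.pyRange_one_succ_right (by positivity)]
    rw [List.foldl_append, ih (by omega)]
    simp only [List.foldl]
    rw [pvArr_lookup arr j (by omega), pvPXor_succ arr j (by omega)]

-- the two loops march in lockstep: A's window starting at j equals B's p[j+k]^p[j]
theorem pv_loop2 (arr : List Int) (kn : Nat) (hk1 : 1 ≤ kn) (hk2 : kn ≤ arr.length + 1) :
    ∀ (m j : Nat) (ans : Int), j + m = arr.length + 1 - kn →
      ((PySem.List.pyRange ((kn - 1 + j : Nat) : Int) (arr.length : Int) 1).foldl
          (pvStepA arr (kn : Int))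
          (PySem.Int.bxor (pvPXor arr (kn - 1 + j)) (pvPXor arr j), ans)).2
      = (PySem.List.pyRange ((j : Nat) : Int) ((arr.length + 1 - kn : Nat) : Int) 1).foldl
          (pvStepB (pvPrefixes arr 0) (kn : Int)) ans := by
  intro m
  induction m with
  | zero =>
    intro j ans hj
    have h1 : kn - 1 + j = arr.length := by omega
    have h2 : j = arr.length + 1 - kn := by omega
    rw [h1, h2]
    rw [PySem.List.pyRange_one_eq_nil (le_refl _), PySem.List.pyRange_one_eq_nil (le_refl _)]
    rfl
  | succ m ih =>
    intro j ans hj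
    have hjlt : j < arr.length + 1 - kn := by omega
    have hjn : j < arr.length := by omega
    have hin : kn - 1 + j < arr.length := by omega
    rw [PySem.List.pyRange_one_cons (a := ((kn - 1 + j : Nat) : Int)) (b := (arr.length : Int))
          (by omega),
        PySem.List.pyRange_one_cons (a := ((j : Nat) : Int))
          (b := ((arr.length + 1 - kn : Nat) : Int)) (by omega)]
    simp only [List.foldl]
    -- evaluate A's step
    have hxA : pvStepA arr (kn : Int)
        (PySem.Int.bxor (pvPXor arr (kn - 1 + j)) (pvPXor arr j), ans) ((kn - 1 + j : Nat) : Int)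
        = (PySem.Int.bxor (pvPXor arr (kn - 1 + (j + 1))) (pvPXor arr (j + 1)),
           if PySem.Int.bxor (pvPXor arr (j + kn)) (pvPXor arr j) > ans
             then PySem.Int.bxor (pvPXor arr (j + kn)) (pvPXor arr j) else ans) := by
      unfold pvStepA
      dsimp only
      rw [pvArr_lookup arr (kn - 1 + j) hin]
      have hx : PySem.Int.bxor (PySem.Int.bxor (pvPXor arr (kn - 1 + j)) (pvPXor arr j))
          arr[kn - 1 + j] = PySem.Int.bxor (pvPXor arr (j + kn)) (pvPXor arr j) := by
        rw [pv_bxor_right_comm, ← pvPXor_succ arr (kn - 1 + j) hin]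
        have : kn - 1 + j + 1 = j + kn := by omega
        rw [this]
      have hidx : ((kn - 1 + j : Nat) : Int) - (kn : Int) + 1 = ((j : Nat) : Int) := by
        push_cast; omega
      rw [hx, hidx, pvArr_lookup arr j hjn]
      have hx2 : PySem.Int.bxor (PySem.Int.bxor (pvPXor arr (j + kn)) (pvPXor arr j)) arr[j]
          = PySem.Int.bxor (pvPXor arr (kn - 1 + (j + 1))) (pvPXor arr (j + 1)) := by
        rw [pv_bxor_assoc, ← pvPXor_succ arr j hjn]
        have : j + kn = kn - 1 + (j + 1) := by omega
        rw [this]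
      rw [hx2]
    -- evaluate B's step
    have hxB : pvStepB (pvPrefixes arr 0) (kn : Int) ans ((j : Nat) : Int)
        = (if PySem.Int.bxor (pvPXor arr (j + kn)) (pvPXor arr j) > ans
             then PySem.Int.bxor (pvPXor arr (j + kn)) (pvPXor arr j) else ans) := by
      unfold pvStepB
      dsimp only
      have hs : ((j : Nat) : Int) + (kn : Int) = ((j + kn : Nat) : Int) := by push_cast; ring
      rw [hs, pvP_lookup arr (j + kn) (by omega), pvP_lookup arr j (by omega)]
    rw [hxA, hxB]
    have e1 : ((kn - 1 + j : Nat) : Int) + 1 = ((kn - 1 + (j + 1) : Nat) : Int) := by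
      push_cast; ring
    have e2 : ((j : Nat) : Int) + 1 = ((j + 1 : Nat) : Int) := by push_cast; ring
    rw [e1, e2]
    exact ih (j + 1) _ (by omega)

-- ===== VERDICT (by name: the statement is the Claim_ definition above) =====
theorem maxSubarrayXOR_spec : Claim_equal_maxSubarrayXOR := by
  intro arr k _ hpre
  obtain ⟨hk1, hk2⟩ := hpre
  unfold Spec_maxSubarrayXOR maxSubarrayXOR maxSubarrayXOR_alt
  set kn : Nat := k.toNat with hkn
  have hk : k = (kn : Int) := by omega
  have hkn1 : 1 ≤ kn := by omega
  have hkn2 : kn ≤ arr.length + 1 := by omega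
  -- B's prefix list
  have hp : arr.foldl pvBuildP [0] = pvPrefixes arr 0 := by
    have := pv_foldl_buildP arr [] 0
    simpa using this
  rw [hp]
  -- cast the range bounds
  have hb1 : k - 1 = ((kn - 1 : Nat) : Int) := by omega
  have hb2 : (arr.length : Int) - k + 1 = ((arr.length + 1 - kn : Nat) : Int) := by omega
  rw [hb1, hb2, hk]
  rw [pv_loop1 arr (kn - 1) (by omega)]
  have h0 : pvPXor arr (kn - 1)
      = PySem.Int.bxor (pvPXor arr (kn - 1 + 0)) (pvPXor arr 0) := by
    simp [pvPXor_zero, PySem.Int.bxor_zero]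
  rw [h0]
  have := pv_loop2 arr kn hkn1 hkn2 (arr.length + 1 - kn) 0 0 (by omega)
  simpa using this
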